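-- pv_equiv track=rewrite | github.com/zzs95/MRANet | utils/file_and_folder_operations.py | filterfile
-- ===== SOURCE A (Python) =====
-- from copy import deepcopy
--
-- def filterfile(files_list, pass_keys=[]):
--     wanted_files = deepcopy(files_list)
--     for f in files_list:
--         for not_include in pass_keys:
--             if not_include in f:
--                 try:
--                     wanted_files.remove(f)
--                     continue
--                 except:
--                     pass
--     return wanted_files
-- ===== SOURCE B (Python) =====
-- from copy import deepcopy
--
-- def filterfile(files_list, pass_keys=[]):
--     wanted_files = deepcopy(files_list)
--     bad = set()
--     for f in wanted_files:
--         if any(k in f for k in pass_keys):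
--             bad.add(f)
--     result = []
--     for f in wanted_files:
--         if f not in bad:
--             result.append(f)
--     return result
-- ===== Notes on version B (the rewrite author's own statement) =====
-- stated objective: alternative
-- what changed: replaces A's subtractive nested loop of repeated list.remove calls with two passes: first build a hash set of files matching some forbidden key, then append to the result the files not in that set
import Mathlib
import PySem

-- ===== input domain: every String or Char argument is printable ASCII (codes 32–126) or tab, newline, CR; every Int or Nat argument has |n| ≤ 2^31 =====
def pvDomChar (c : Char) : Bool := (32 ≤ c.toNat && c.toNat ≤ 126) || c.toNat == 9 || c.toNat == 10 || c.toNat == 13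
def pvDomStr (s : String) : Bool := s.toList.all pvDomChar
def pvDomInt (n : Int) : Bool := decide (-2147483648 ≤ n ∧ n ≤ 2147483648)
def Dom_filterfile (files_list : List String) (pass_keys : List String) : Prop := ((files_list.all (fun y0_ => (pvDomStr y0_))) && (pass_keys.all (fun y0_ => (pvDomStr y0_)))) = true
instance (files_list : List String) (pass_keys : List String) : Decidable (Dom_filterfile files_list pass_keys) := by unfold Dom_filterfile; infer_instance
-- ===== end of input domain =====

-- B replaces A's subtractive nested remove loop with two passes: build a set of the files matching some key, then collect the files not in it.

-- ===== PORT A =====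
-- wanted_files = deepcopy(files_list); for f in files_list: for k in pass_keys:
--   if k in f: try wanted_files.remove(f) except pass
-- 'remove' removes the FIRST occurrence; 'except: pass' keeps the list unchanged when f is absent.
def filterfile (files_list : List String) (pass_keys : List String) : List String :=
  files_list.foldl
    (fun wanted f =>
      pass_keys.foldl
        (fun acc k =>
          if PySem.Str.isIn k f then (PySem.List.remove? acc f).getD acc else acc)
        wanted)
    files_list

-- ===== PORT B =====
-- wanted_files = deepcopy(files_list)
-- bad = set(); for f in wanted_files: if any(k in f for k in pass_keys): bad.add(f)
-- result = []; for f in wanted_files: if f not in bad: result.append(f); return result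
def filterfile_alt (files_list : List String) (pass_keys : List String) : List String :=
  let bad : PySem.Set String :=
    files_list.foldl
      (fun bad f => if pass_keys.any (fun k => PySem.Str.isIn k f) then PySem.Set.add bad f else bad)
      PySem.Set.empty
  files_list.foldl
    (fun result f => if PySem.Set.contains bad f then result else result ++ [f])
    []

-- ===== PRECONDITION & SPEC =====
def Spec_filterfile (files_list : List String) (pass_keys : List String) (out : List String) : Prop := out = filterfile_alt files_list pass_keys
instance (files_list : List String) (pass_keys : List String) (out : List String) : Decidable (Spec_filterfile files_list pass_keys out) := by unfold Spec_filterfile; infer_instance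

-- ===== CLAIM (what is proved, stated in full; the proofs are below) =====
def Claim_equal_filterfile : Prop := ∀ (files_list : List String) (pass_keys : List String), Dom_filterfile files_list pass_keys → Spec_filterfile files_list pass_keys (filterfile files_list pass_keys)

-- ===== LEMMAS AND PROOFS =====

-- Membership in B's 'bad' set: exactly the files of the list matching the predicate.
theorem pvMem_badFold (l : List String) (p : String → Bool) (s : PySem.Set String) (x : String) :
    x ∈ l.foldl (fun s f => if p f then PySem.Set.add s f else s) s ↔ x ∈ s ∨ (x ∈ l ∧ p x = true) := by
  induction l generalizing s with
  | nil => simp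
  | cons f rest ih =>
      simp only [List.foldl_cons]
      by_cases hpf : p f = true
      · rw [if_pos hpf, ih]
        simp only [PySem.Set.mem_add, List.mem_cons]
        constructor
        · rintro (⟨h | rfl⟩ | ⟨hm, hp⟩)
          · exact Or.inl h
          · exact Or.inr ⟨Or.inl rfl, hpf⟩
          · exact Or.inr ⟨Or.inr hm, hp⟩
        · rintro (h | ⟨rfl | hm, hp⟩)
          · exact Or.inl (Or.inl h)
          · exact Or.inl (Or.inr rfl)
          · exact Or.inr ⟨hm, hp⟩
      · rw [if_neg hpf, ih]
        simp only [List.mem_cons]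
        constructor
        · rintro (h | ⟨hm, hp⟩)
          · exact Or.inl h
          · exact Or.inr ⟨Or.inr hm, hp⟩
        · rintro (h | ⟨rfl | hm, hp⟩)
          · exact Or.inl h
          · exact absurd hp hpf
          · exact Or.inr ⟨hm, hp⟩

-- B computes the filter of the non-matching files.
theorem pvSecondFold (bad : PySem.Set String) (l acc : List String) :
    l.foldl (fun result f => if PySem.Set.contains bad f then result else result ++ [f]) acc
      = acc ++ l.filter (fun f => !(PySem.Set.contains bad f)) := by
  induction l generalizing acc with
  | nil => simp
  | cons f rest ih =>
      simp only [List.foldl_cons]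
      cases h : PySem.Set.contains bad f
      · rw [if_neg (by simp [h]), ih]
        have hnot : f ∉ bad := by
          intro hm
          rw [(PySem.Set.contains_iff bad f).mpr hm] at h
          cases h
        rw [List.filter_cons_of_pos (by simp [hnot])]
        simp
      · rw [if_pos (by simp [h]), ih]
        have hmem : f ∈ bad := (PySem.Set.contains_iff bad f).mp h
        rw [List.filter_cons_of_neg (by simp [hmem])]

theorem pvAlt_eq_filter (files_list : List String) (pass_keys : List String) :
    filterfile_alt files_list pass_keys
      = files_list.filter (fun f => !(pass_keys.any (fun k => PySem.Str.isIn k f))) := by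
  simp only [filterfile_alt]
  rw [pvSecondFold]
  simp only [List.nil_append]
  refine List.filter_congr ?_
  intro f hf
  set p : String → Bool := fun f => pass_keys.any (fun k => PySem.Str.isIn k f) with hp
  have : PySem.Set.contains
      (files_list.foldl (fun s f => if p f then PySem.Set.add s f else s) PySem.Set.empty) f = p f := by
    cases hc : p f
    · simp only [Bool.eq_false_iff]
      intro habs
      have := (PySem.Set.contains_iff _ _).mp habs
      rw [pvMem_badFold] at this
      rcases this with h | ⟨_, hpf⟩
      · simp [PySem.Set.empty] at h
      · rw [hc] at hpf; exact Bool.false_ne_true hpf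
    · exact (PySem.Set.contains_iff _ _).mpr
        ((pvMem_badFold files_list p PySem.Set.empty f).mpr (Or.inr ⟨hf, hc⟩))
  rw [this]

-- A's inner removal step is exactly List.erase (remove of an absent element is a no-op).
theorem pvStep_eq_erase (acc : List String) (f : String) :
    (PySem.List.remove? acc f).getD acc = acc.erase f := by
  by_cases h : f ∈ acc
  · rw [PySem.List.remove?_eq_some_erase acc f h]; rfl
  · rw [(PySem.List.remove?_eq_none_iff acc f).mpr h, List.erase_of_not_mem h]; rfl

-- abbreviation for A's inner fold over the keys
def pvInner (pass_keys : List String) (f : String) (acc : List String) : List String :=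
  pass_keys.foldl
    (fun acc k => if PySem.Str.isIn k f then (PySem.List.remove? acc f).getD acc else acc) acc

-- If no key matches f, the inner fold leaves the list unchanged.
theorem pvInner_no_match (keys : List String) (f : String) (acc : List String)
    (h : ∀ k ∈ keys, PySem.Str.isIn k f = false) : pvInner keys f acc = acc := by
  induction keys generalizing acc with
  | nil => rfl
  | cons k ks ih =>
      simp only [pvInner, List.foldl_cons] at *
      rw [h k (by simp), if_neg (by simp)]
      exact ih acc (fun k hk => h k (List.mem_cons_of_mem _ hk))

-- The inner fold never touches elements satisfying a predicate false at f.
theorem pvInner_filter (keys : List String) (f : String) (acc : List String)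
    (p : String → Bool) (hp : p f = false) :
    (pvInner keys f acc).filter p = acc.filter p := by
  induction keys generalizing acc with
  | nil => rfl
  | cons k ks ih =>
      simp only [pvInner, List.foldl_cons] at *
      split
      · rw [ih ((PySem.List.remove? acc f).getD acc), pvStep_eq_erase,
            ← List.erase_filter, List.erase_of_not_mem]
        simp [List.mem_filter, hp]
      · exact ih acc

-- Counts of values other than f are unchanged by the inner fold.
theorem pvInner_count_ne (keys : List String) (f v : String) (acc : List String)
    (hv : v ≠ f) : (pvInner keys f acc).count v = acc.count v := by
  induction keys generalizing acc with
  | nil => rfl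
  | cons k ks ih =>
      simp only [pvInner, List.foldl_cons] at *
      split
      · rw [ih, pvStep_eq_erase, List.count_erase_of_ne hv]
      · exact ih acc

-- The count of f never increases under the inner fold.
theorem pvInner_count_le (keys : List String) (f : String) (acc : List String) :
    (pvInner keys f acc).count f ≤ acc.count f := by
  induction keys generalizing acc with
  | nil => exact le_rfl
  | cons k ks ih =>
      simp only [pvInner, List.foldl_cons] at *
      split
      · exact le_trans (ih _) (by rw [pvStep_eq_erase, List.count_erase_self]; omega)
      · exact ih acc

-- If some key matches f, the inner fold removes at least one occurrence of f (when any remain).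
theorem pvInner_count_dec (keys : List String) (f : String) (acc : List String)
    (h : ∃ k ∈ keys, PySem.Str.isIn k f = true) :
    (pvInner keys f acc).count f ≤ acc.count f - 1 := by
  induction keys generalizing acc with
  | nil => simp at h
  | cons k ks ih =>
      simp only [pvInner, List.foldl_cons] at *
      by_cases hk : PySem.Str.isIn k f = true
      · rw [if_pos hk]
        exact le_trans (pvInner_count_le ks f _)
          (by rw [pvStep_eq_erase, List.count_erase_self])
      · rw [if_neg hk]
        rcases h with ⟨k', hk', hmatch⟩
        rcases List.mem_cons.mp hk' with rfl | hmem
        · exact absurd hmatch hk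
        · exact ih acc ⟨k', hmem, hmatch⟩

-- The outer invariant: survivors keep exactly the non-matching files, matching files die out.
theorem pvOuter (pass_keys : List String) (l wanted : List String)
    (hcnt : ∀ v, (pass_keys.any (fun k => PySem.Str.isIn k v)) = true →
      wanted.count v ≤ l.count v) :
    (l.foldl (fun w f => pvInner pass_keys f w) wanted).filter
        (fun f => !(pass_keys.any (fun k => PySem.Str.isIn k f)))
      = wanted.filter (fun f => !(pass_keys.any (fun k => PySem.Str.isIn k f))) ∧
    ∀ v, (pass_keys.any (fun k => PySem.Str.isIn k v)) = true →
      (l.foldl (fun w f => pvInner pass_keys f w) wanted).count v = 0 := by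
  induction l generalizing wanted with
  | nil =>
      refine ⟨rfl, fun v hv => ?_⟩
      have := hcnt v hv
      simpa using this
  | cons f rest ih =>
      simp only [List.foldl_cons]
      by_cases hf : (pass_keys.any (fun k => PySem.Str.isIn k f)) = true
      · rcases List.any_eq_true.mp hf with ⟨k, hk, hmatch⟩
        have hdec := pvInner_count_dec pass_keys f wanted ⟨k, hk, hmatch⟩
        have h1 : ∀ v, (pass_keys.any (fun k => PySem.Str.isIn k v)) = true →
            (pvInner pass_keys f wanted).count v ≤ rest.count v := by
          intro v hv
          by_cases hvf : v = f
          · subst hvf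
            have := hcnt v hv
            simp only [List.count_cons_self] at this
            omega
          · rw [pvInner_count_ne pass_keys f v wanted hvf]
            have := hcnt v hv
            rwa [List.count_cons_of_ne (Ne.symm hvf)] at this
        rcases ih (pvInner pass_keys f wanted) h1 with ⟨hfil, hzero⟩
        refine ⟨?_, hzero⟩
        rw [hfil, pvInner_filter pass_keys f wanted _ (by simpa using hf)]
      · have hnone : ∀ k ∈ pass_keys, PySem.Str.isIn k f = false := by
          intro k hk
          cases hcase : PySem.Str.isIn k f
          · rfl
          · exact absurd (List.any_eq_true.mpr ⟨k, hk, hcase⟩) hf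
        rw [pvInner_no_match pass_keys f wanted hnone]
        refine ih wanted ?_
        intro v hv
        have hvf : v ≠ f := by rintro rfl; exact hf hv
        have := hcnt v hv
        rwa [List.count_cons_of_ne (Ne.symm hvf)] at this

-- ===== VERDICT (by name: the statement is the Claim_ definition above) =====
theorem filterfile_spec : Claim_equal_filterfile := by
  intro files_list pass_keys _
  unfold Spec_filterfile filterfile
  rw [pvAlt_eq_filter]
  have h := pvOuter pass_keys files_list files_list (fun v _ => le_rfl)
  rcases h with ⟨hfil, hzero⟩
  have hall : ∀ v ∈ files_list.foldl (fun w f => pvInner pass_keys f w) files_list,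
      (!(pass_keys.any (fun k => PySem.Str.isIn k v))) = true := by
    intro v hv
    by_contra hbad
    have hbad' : (pass_keys.any (fun k => PySem.Str.isIn k v)) = true := by
      simpa using hbad
    have := hzero v hbad'
    exact absurd (List.count_pos_iff.mpr hv) (by omega)
  have hself := List.filter_eq_self.mpr hall
  calc files_list.foldl
        (fun wanted f => pass_keys.foldl
          (fun acc k => if PySem.Str.isIn k f then (PySem.List.remove? acc f).getD acc else acc) wanted)
        files_list
      = files_list.foldl (fun w f => pvInner pass_keys f w) files_list := rfl
    _ = (files_list.foldl (fun w f => pvInner pass_keys f w) files_list).filter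
          (fun f => !(pass_keys.any (fun k => PySem.Str.isIn k f))) := hself.symm
    _ = files_list.filter (fun f => !(pass_keys.any (fun k => PySem.Str.isIn k f))) := hfil
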